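-- pv_equiv track=rewrite | github.com/AbhienayaSri9509/Orchestrate | code/response_generator.py | _get_escalation_category
-- ===== SOURCE A (Python) =====
-- def _get_escalation_category(product_area: str, reasons: list) -> str:
--     """Determine the escalation template category from product area and reasons."""
--     reasons_str = " ".join(reasons).lower()
--
--     if any(kw in reasons_str for kw in ["fraud", "identity", "stolen", "unauthorized", "scam"]):
--         return "fraud"
--     if any(kw in reasons_str for kw in ["billing", "payment", "refund", "charged", "money"]):
--         return "billing"
--     if any(kw in reasons_str for kw in ["access", "locked", "restore"]):
--         return "account_access"
--     if any(kw in reasons_str for kw in ["score", "grade", "unfairly"]):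
--         return "score_dispute"
--     if any(kw in reasons_str for kw in ["subscription", "pause", "cancel"]):
--         return "subscription"
--     if any(kw in reasons_str for kw in ["vulnerability", "security", "bug bounty"]):
--         return "security_vulnerability"
--
--     return "default"
-- ===== SOURCE B (Python) =====
-- # B: instead of testing categories one by one in priority order, scan the text
-- # once against a flat keyword->rank map, collect the ranks of ALL keywords that
-- # occur, and return the category of the minimum rank found.
--
-- _CATEGORY_BY_RANK = [
--     "fraud", "billing", "account_access",
--     "score_dispute", "subscription", "security_vulnerability",
-- ]
--
-- _KEYWORD_RANK = {
--     "fraud": 0, "identity": 0, "stolen": 0, "unauthorized": 0, "scam": 0,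
--     "billing": 1, "payment": 1, "refund": 1, "charged": 1, "money": 1,
--     "access": 2, "locked": 2, "restore": 2,
--     "score": 3, "grade": 3, "unfairly": 3,
--     "subscription": 4, "pause": 4, "cancel": 4,
--     "vulnerability": 5, "security": 5, "bug bounty": 5,
-- }
--
-- def _get_escalation_category(product_area: str, reasons: list) -> str:
--     text = " ".join(reasons).lower()
--     hits = [rank for kw, rank in _KEYWORD_RANK.items() if kw in text]
--     return _CATEGORY_BY_RANK[min(hits)] if hits else "default"
-- ===== Notes on version B (the rewrite author's own statement) =====
-- stated objective: alternative
-- what changed: Instead of six ordered short-circuit any()-tests, B scans a flat keyword->rank map once, collects the ranks of all keywords present, and indexes the category list by the minimum rank (first-match priority becomes a min over ranks).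
import Mathlib
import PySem

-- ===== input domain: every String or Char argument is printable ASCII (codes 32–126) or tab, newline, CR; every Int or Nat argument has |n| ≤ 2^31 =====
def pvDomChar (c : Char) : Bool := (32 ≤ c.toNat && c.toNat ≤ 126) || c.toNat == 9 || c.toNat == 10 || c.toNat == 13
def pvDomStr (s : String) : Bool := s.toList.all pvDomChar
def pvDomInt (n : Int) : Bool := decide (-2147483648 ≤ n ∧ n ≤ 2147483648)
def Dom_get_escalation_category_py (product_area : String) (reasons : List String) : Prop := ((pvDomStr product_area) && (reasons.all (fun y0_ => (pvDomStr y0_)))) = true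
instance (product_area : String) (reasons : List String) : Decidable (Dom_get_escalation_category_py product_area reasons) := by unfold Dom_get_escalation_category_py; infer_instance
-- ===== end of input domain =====

-- B replaces A's six ordered short-circuit any()-tests by one flat keyword->rank scan: collect the ranks of all keywords present and index the category list by the minimum rank.


-- ===== PORT A =====
def get_escalation_category_py (product_area : String) (reasons : List String) : String :=
  let reasons_str := PySem.Str.lower (PySem.Str.join " " reasons)
  if ["fraud", "identity", "stolen", "unauthorized", "scam"].any (fun kw => PySem.Str.isIn kw reasons_str) then "fraud"
  else if ["billing", "payment", "refund", "charged", "money"].any (fun kw => PySem.Str.isIn kw reasons_str) then "billing"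
  else if ["access", "locked", "restore"].any (fun kw => PySem.Str.isIn kw reasons_str) then "account_access"
  else if ["score", "grade", "unfairly"].any (fun kw => PySem.Str.isIn kw reasons_str) then "score_dispute"
  else if ["subscription", "pause", "cancel"].any (fun kw => PySem.Str.isIn kw reasons_str) then "subscription"
  else if ["vulnerability", "security", "bug bounty"].any (fun kw => PySem.Str.isIn kw reasons_str) then "security_vulnerability"
  else "default"

-- ===== PORT B =====
def categoryByRank : List String :=
  ["fraud", "billing", "account_access", "score_dispute", "subscription", "security_vulnerability"]

def kwRank : List (String × Nat) :=
  [ ("fraud", 0), ("identity", 0), ("stolen", 0), ("unauthorized", 0), ("scam", 0),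
    ("billing", 1), ("payment", 1), ("refund", 1), ("charged", 1), ("money", 1),
    ("access", 2), ("locked", 2), ("restore", 2),
    ("score", 3), ("grade", 3), ("unfairly", 3),
    ("subscription", 4), ("pause", 4), ("cancel", 4),
    ("vulnerability", 5), ("security", 5), ("bug bounty", 5) ]

def get_escalation_category_py_alt (product_area : String) (reasons : List String) : String :=
  let text := PySem.Str.lower (PySem.Str.join " " reasons)
  let hits := kwRank.filterMap (fun p => if PySem.Str.isIn p.1 text then some p.2 else none)
  match hits with
  | [] => "default"
  | h :: t => categoryByRank.getD (t.foldl Nat.min h) ""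

-- ===== PRECONDITION & SPEC =====
def Spec_get_escalation_category_py (product_area : String) (reasons : List String) (out : String) : Prop := out = get_escalation_category_py_alt product_area reasons
instance (product_area : String) (reasons : List String) (out : String) : Decidable (Spec_get_escalation_category_py product_area reasons out) := by unfold Spec_get_escalation_category_py; infer_instance

-- ===== CLAIM (what is proved, stated in full; the proofs are below) =====
def Claim_equal_get_escalation_category_py : Prop := ∀ (product_area : String) (reasons : List String), Dom_get_escalation_category_py product_area reasons → Spec_get_escalation_category_py product_area reasons (get_escalation_category_py product_area reasons)

-- ===== LEMMAS AND PROOFS =====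

-- the six keyword groups in priority order; flattening them with their rank gives kwRank
def pvGroups : List (List String) :=
  [ ["fraud", "identity", "stolen", "unauthorized", "scam"],
    ["billing", "payment", "refund", "charged", "money"],
    ["access", "locked", "restore"],
    ["score", "grade", "unfairly"],
    ["subscription", "pause", "cancel"],
    ["vulnerability", "security", "bug bounty"] ]

def pvFlat : List (List String) → Nat → List (String × Nat)
  | [], _ => []
  | g :: rest, k => g.map (fun kw => (kw, k)) ++ pvFlat rest (k + 1)

lemma kwRank_eq_flat : kwRank = pvFlat pvGroups 0 := by rfl

lemma pvFlat_rank_ge (f : String → Bool) :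
    ∀ (gs : List (List String)) (k r : Nat),
      r ∈ (pvFlat gs k).filterMap (fun p => if f p.1 then some p.2 else none) → k ≤ r := by
  intro gs
  induction gs with
  | nil => intro k r h; simp [pvFlat] at h
  | cons g rest ih =>
    intro k r h
    simp only [pvFlat, List.filterMap_append, List.mem_append] at h
    rcases h with h | h
    · simp only [List.filterMap_map, Function.comp, List.mem_filterMap] at h
      obtain ⟨kw, _, hkw⟩ := h
      by_cases hf : f kw <;> simp [hf] at hkw
      omega
    · have := ih (k + 1) r h; omega

lemma foldl_min_le_init : ∀ (t : List Nat) (h : Nat), t.foldl Nat.min h ≤ h := by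
  intro t
  induction t with
  | nil => simp
  | cons a t ih =>
    intro h
    calc (a :: t).foldl Nat.min h = t.foldl Nat.min (Nat.min h a) := rfl
      _ ≤ Nat.min h a := ih _
      _ ≤ h := Nat.min_le_left _ _

lemma le_foldl_min : ∀ (t : List Nat) (h k : Nat), k ≤ h → (∀ a ∈ t, k ≤ a) → k ≤ t.foldl Nat.min h := by
  intro t
  induction t with
  | nil => intro h k hk _; simpa using hk
  | cons a t ih =>
    intro h k hk hall
    exact ih _ _ (le_min hk (hall a (by simp))) (fun b hb => hall b (by simp [hb]))

-- min over the flat hit list = rank of the first group containing a hit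
lemma pvMin_flat (f : String → Bool) :
    ∀ (gs : List (List String)) (k : Nat),
      (match (pvFlat gs k).filterMap (fun p => if f p.1 then some p.2 else none) with
       | [] => (none : Option Nat)
       | h :: t => some (t.foldl Nat.min h))
      = (gs.findIdx? (fun g => g.any f)).map (fun i => i + k) := by
  intro gs
  induction gs with
  | nil => intro k; simp [pvFlat]
  | cons g rest ih =>
    intro k
    simp only [pvFlat, List.filterMap_append, List.filterMap_map, Function.comp]
    by_cases hg : g.any f
    · -- some keyword of g is present: the flat hit list starts with rank k, and everything is ≥ k
      obtain ⟨kw0, hmem, hf0⟩ := List.any_eq_true.mp hg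
      have hfirst : g.filterMap (fun kw => if f kw then some ((kw, k) : String × Nat).2 else none) ≠ [] := by
        intro hnil
        have : (k : Nat) ∈ g.filterMap (fun kw => if f kw then some ((kw, k) : String × Nat).2 else none) := by
          exact List.mem_filterMap.mpr ⟨kw0, hmem, by simp [hf0]⟩
        rw [hnil] at this; simp at this
      rcases hl : g.filterMap (fun kw => if f kw then some ((kw, k) : String × Nat).2 else none) with _ | ⟨h, t⟩
      · exact absurd hl hfirst
      · have hhead : h = k := by
          have : h ∈ g.filterMap (fun kw => if f kw then some ((kw, k) : String × Nat).2 else none) := by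
            rw [hl]; simp
          obtain ⟨kw, _, hkw⟩ := List.mem_filterMap.mp this
          by_cases hf : f kw <;> simp [hf] at hkw
          omega
        have hall : ∀ a ∈ t ++ (pvFlat rest (k + 1)).filterMap (fun p => if f p.1 then some p.2 else none), k ≤ a := by
          intro a ha
          rcases List.mem_append.mp ha with ha | ha
          · have : a ∈ g.filterMap (fun kw => if f kw then some ((kw, k) : String × Nat).2 else none) := by
              rw [hl]; simp [ha]
            obtain ⟨kw, _, hkw⟩ := List.mem_filterMap.mp this
            by_cases hf : f kw <;> simp [hf] at hkw
            omega
          · have := pvFlat_rank_ge f rest (k + 1) a ha; omega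
        simp only [List.cons_append]
        have hfold : (t ++ (pvFlat rest (k + 1)).filterMap (fun p => if f p.1 then some p.2 else none)).foldl Nat.min h = k := by
          apply le_antisymm
          · calc _ ≤ h := foldl_min_le_init _ _
              _ = k := hhead
          · exact le_foldl_min _ _ _ (by omega) hall
        rw [hfold, List.findIdx?_cons]
        simp [hg]
    · -- no keyword of g present: its contribution is empty, recurse with rank k+1
      have hempty : g.filterMap (fun kw => if f kw then some ((kw, k) : String × Nat).2 else none) = [] := by
        rw [List.filterMap_eq_nil_iff]
        intro kw hkw
        have : f kw = false := by
          by_contra hc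
          exact hg (List.any_eq_true.mpr ⟨kw, hkw, by simpa using hc⟩)
        simp [this]
      rw [hempty, List.nil_append, ih (k + 1), List.findIdx?_cons]
      simp only [hg, Bool.false_eq_true, if_false, Option.map_map]
      cases List.findIdx? (fun g => g.any f) rest with
      | none => rfl
      | some i =>
        simp only [Option.map_some, Function.comp_apply, Option.some.injEq]
        omega

-- ===== VERDICT (by name: the statement is the Claim_ definition above) =====
set_option maxHeartbeats 1000000 in
theorem get_escalation_category_py_spec : Claim_equal_get_escalation_category_py := by
  intro product_area reasons _
  unfold Spec_get_escalation_category_py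
  simp only [get_escalation_category_py, get_escalation_category_py_alt, kwRank_eq_flat]
  have key := pvMin_flat (fun kw => PySem.Str.isIn kw (PySem.Str.lower (PySem.Str.join " " reasons))) pvGroups 0
  rcases hfm : (pvFlat pvGroups 0).filterMap
      (fun p => if PySem.Str.isIn p.1 (PySem.Str.lower (PySem.Str.join " " reasons)) then some p.2 else none) with _ | ⟨h, t⟩ <;>
    rw [hfm] at key <;>
    (try rw [hfm]) <;>
    simp only [pvGroups, List.findIdx?_cons, List.findIdx?_nil] at key <;>
    split_ifs at key ⊢ with h1 h2 h3 h4 h5 h6 <;>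
    simp only [Option.map_some, Option.map_none, Option.some.injEq, Nat.add_zero, Nat.zero_add] at key <;>
    first
      | (rw [show (match h :: t with
                   | [] => "default"
                   | h :: t => categoryByRank.getD (List.foldl Nat.min h t) "") =
            categoryByRank.getD (List.foldl Nat.min h t) "" from rfl, key]; rfl)
      | rfl
      | simp at key
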